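-- pv_equiv track=rewrite | github.com/d-padmanabhan/aws_network_shell | src/aws_network_tools/modules/anfw.py | resolve_item
-- ===== SOURCE A (Python) =====
-- from typing import Optional, Dict, List
--
-- def resolve_item(
--     items: list[dict], ref: str, name_key: str, id_key: str
-- ) -> Optional[dict]:
--     """Resolve item by index (1-based), name, or ID"""
--     if ref.isdigit():
--         idx = int(ref) - 1
--         if 0 <= idx < len(items):
--             return items[idx]
--     for item in items:
--         if item.get(id_key) == ref:
--             return item
--     for item in items:
--         if item.get(name_key) and item[name_key].lower() == ref.lower():
--             return item
--     return None
-- ===== SOURCE B (Python) =====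
-- def resolve_item(items, ref, name_key, id_key):
--     if ref.isdigit():
--         idx = int(ref) - 1
--         if 0 <= idx < len(items):
--             return items[idx]
--     id_match = None
--     name_match = None
--     low = ref.lower()
--     for item in items:
--         if id_match is None and item.get(id_key) == ref:
--             id_match = item
--         if name_match is None and item.get(name_key) and item[name_key].lower() == low:
--             name_match = item
--     return id_match if id_match is not None else name_match
-- ===== Notes on version B (the rewrite author's own statement) =====
-- stated objective: alternative
-- what changed: A's two sequential scans (id scan, then name scan) are replaced by a single pass over items that maintains two first-hit candidates (id_match, name_match) and picks id_match first after the loop.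
import Mathlib
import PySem

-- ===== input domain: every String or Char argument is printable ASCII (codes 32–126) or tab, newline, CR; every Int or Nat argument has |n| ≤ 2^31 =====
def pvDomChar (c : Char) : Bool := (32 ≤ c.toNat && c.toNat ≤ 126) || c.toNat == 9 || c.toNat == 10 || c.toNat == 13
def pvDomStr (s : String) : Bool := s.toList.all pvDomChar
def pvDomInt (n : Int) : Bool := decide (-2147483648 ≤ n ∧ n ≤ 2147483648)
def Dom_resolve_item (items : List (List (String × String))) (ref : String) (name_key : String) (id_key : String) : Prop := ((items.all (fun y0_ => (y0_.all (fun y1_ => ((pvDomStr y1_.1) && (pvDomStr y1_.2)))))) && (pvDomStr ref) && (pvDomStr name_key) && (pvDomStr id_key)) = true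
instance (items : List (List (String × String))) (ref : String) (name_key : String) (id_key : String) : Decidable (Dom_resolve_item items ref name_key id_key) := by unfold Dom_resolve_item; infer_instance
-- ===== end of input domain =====

-- B replaces A's two sequential scans (id, then name) by one pass keeping two first-hit candidates; alternative decomposition, same cost.

-- ===== PORT A =====
-- dict.get(k): first-match lookup in the association list (exact for Python dicts, whose keys are unique)
def pvGet (item : List (String × String)) (k : String) : Option String :=
  (item.find? (fun p => p.1 == k)).map (·.2)

-- first loop of A: 'for item in items: if item.get(id_key) == ref: return item'
def pvIdScan (items : List (List (String × String))) (ref : String) (id_key : String) : Option (List (String × String)) :=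
  match items with
  | [] => none
  | item :: rest => if pvGet item id_key == some ref then some item else pvIdScan rest ref id_key

-- second loop of A: 'if item.get(name_key) and item[name_key].lower() == ref.lower()' (truthy str = non-empty)
def pvNameScan (items : List (List (String × String))) (name_key : String) (ref : String) : Option (List (String × String)) :=
  match items with
  | [] => none
  | item :: rest =>
      if (match pvGet item name_key with
          | some s => decide (s ≠ "") && (PySem.Str.lower s == PySem.Str.lower ref)
          | none => false) then some item
      else pvNameScan rest name_key ref

def pvScanA (items : List (List (String × String))) (ref : String) (name_key : String) (id_key : String) : Option (List (String × String)) :=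
  match pvIdScan items ref id_key with
  | some x => some x
  | none => pvNameScan items name_key ref

def resolve_item (items : List (List (String × String))) (ref : String) (name_key : String) (id_key : String) : Option (List (String × String)) :=
  if PySem.Str.strIsdigit ref then
    -- int(ref): never raises when ref.isdigit() holds on ASCII, hence getD 0 is never taken
    let idx : Int := (PySem.Int.ofStr? ref).getD 0 - 1
    if 0 ≤ idx ∧ idx < (items.length : Int) then PySem.List.pyGet? items idx
    else pvScanA items ref name_key id_key
  else pvScanA items ref name_key id_key

-- ===== PORT B =====
-- one step of B's single loop over two candidates (low = ref.lower(), computed once)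
def pvStepB (ref : String) (low : String) (name_key : String) (id_key : String)
    (st : Option (List (String × String)) × Option (List (String × String)))
    (item : List (String × String)) :
    Option (List (String × String)) × Option (List (String × String)) :=
  let idm := if st.1.isNone && (pvGet item id_key == some ref) then some item else st.1
  let nm := if st.2.isNone &&
      (match pvGet item name_key with
       | some s => decide (s ≠ "") && (PySem.Str.lower s == low)
       | none => false) then some item else st.2
  (idm, nm)

def pvLoopB (items : List (List (String × String))) (ref : String) (name_key : String) (id_key : String) : Option (List (String × String)) :=
  let low := PySem.Str.lower ref
  let st := items.foldl (pvStepB ref low name_key id_key) (none, none)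
  match st.1 with
  | some x => some x
  | none => st.2

def resolve_item_alt (items : List (List (String × String))) (ref : String) (name_key : String) (id_key : String) : Option (List (String × String)) :=
  if PySem.Str.strIsdigit ref then
    let idx : Int := (PySem.Int.ofStr? ref).getD 0 - 1
    if 0 ≤ idx ∧ idx < (items.length : Int) then PySem.List.pyGet? items idx
    else pvLoopB items ref name_key id_key
  else pvLoopB items ref name_key id_key

-- ===== PRECONDITION & SPEC =====
def Spec_resolve_item (items : List (List (String × String))) (ref : String) (name_key : String) (id_key : String) (out : Option (List (String × String))) : Prop := out = resolve_item_alt items ref name_key id_key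
instance (items : List (List (String × String))) (ref : String) (name_key : String) (id_key : String) (out : Option (List (String × String))) : Decidable (Spec_resolve_item items ref name_key id_key out) := by unfold Spec_resolve_item; infer_instance

-- ===== CLAIM (what is proved, stated in full; the proofs are below) =====
def Claim_equal_resolve_item : Prop := ∀ (items : List (List (String × String))) (ref : String) (name_key : String) (id_key : String), Dom_resolve_item items ref name_key id_key → Spec_resolve_item items ref name_key id_key (resolve_item items ref name_key id_key)

-- ===== LEMMAS AND PROOFS =====

-- loop invariant of B's single pass: each component is the accumulator if already set, else the first hit of the corresponding scan of A
lemma pvLoopB_inv (items : List (List (String × String))) (ref name_key id_key : String)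
    (acc : Option (List (String × String)) × Option (List (String × String))) :
    items.foldl (pvStepB ref (PySem.Str.lower ref) name_key id_key) acc =
      ((match acc.1 with | some x => some x | none => pvIdScan items ref id_key),
       (match acc.2 with | some x => some x | none => pvNameScan items name_key ref)) := by
  induction items generalizing acc with
  | nil => cases acc with | mk a b => cases a <;> cases b <;> rfl
  | cons item rest ih =>
      obtain ⟨a, b⟩ := acc
      simp only [List.foldl_cons, ih]
      cases a <;> cases b <;>
        simp only [pvStepB, pvIdScan, pvNameScan, Option.isNone_some, Option.isNone_none,
          Bool.false_and, Bool.true_and] <;>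
        split_ifs <;> first | rfl | (exfalso; assumption)

lemma pvScanA_eq_pvLoopB (items : List (List (String × String))) (ref name_key id_key : String) :
    pvScanA items ref name_key id_key = pvLoopB items ref name_key id_key := by
  simp only [pvScanA, pvLoopB, pvLoopB_inv]

-- ===== VERDICT (by name: the statement is the Claim_ definition above) =====
theorem resolve_item_spec : Claim_equal_resolve_item := by
  intro items ref name_key id_key _
  unfold Spec_resolve_item resolve_item resolve_item_alt
  split_ifs <;> simp [pvScanA_eq_pvLoopB]
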